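-- pv_equiv track=rewrite | github.com/leonnidaas/STELARIS | APPS/VISUALISATION/STREAMLIT/services/pipeline_service.py | build_trajet_scenarios_map
-- ===== SOURCE A (Python) =====
-- def build_trajet_scenarios_map(scenarios: list[str]) -> dict[str, list[str]]:
--     out: dict[str, list[str]] = {}
--     for scenario_id in scenarios:
--         trajet_key = scenario_id.split("__", 1)[0] if "__" in scenario_id else scenario_id
--         out.setdefault(trajet_key, []).append(scenario_id)
--     for k in out:
--         out[k] = sorted(out[k])
--     return out
-- ===== SOURCE B (Python) =====
-- def build_trajet_scenarios_map(scenarios: list[str]) -> dict[str, list[str]]: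
--     # Register keys in first-occurrence order, then fill groups from ONE globally
--     # sorted pass: members of a group arrive already sorted, so no per-group sort.
--     out: dict[str, list[str]] = {}
--     for scenario_id in scenarios:
--         trajet_key = scenario_id.split("__", 1)[0] if "__" in scenario_id else scenario_id
--         out.setdefault(trajet_key, [])
--     for scenario_id in sorted(scenarios):
--         trajet_key = scenario_id.split("__", 1)[0] if "__" in scenario_id else scenario_id
--         out[trajet_key].append(scenario_id)
--     return out
-- ===== Notes on version B (the rewrite author's own statement) =====
-- stated objective: alternative
-- what changed: B replaces A's per-group sorts with one global sort of the whole input followed by a single grouping pass (keys registered first in first-occurrence order), so no group is ever sorted individually.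
import Mathlib
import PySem

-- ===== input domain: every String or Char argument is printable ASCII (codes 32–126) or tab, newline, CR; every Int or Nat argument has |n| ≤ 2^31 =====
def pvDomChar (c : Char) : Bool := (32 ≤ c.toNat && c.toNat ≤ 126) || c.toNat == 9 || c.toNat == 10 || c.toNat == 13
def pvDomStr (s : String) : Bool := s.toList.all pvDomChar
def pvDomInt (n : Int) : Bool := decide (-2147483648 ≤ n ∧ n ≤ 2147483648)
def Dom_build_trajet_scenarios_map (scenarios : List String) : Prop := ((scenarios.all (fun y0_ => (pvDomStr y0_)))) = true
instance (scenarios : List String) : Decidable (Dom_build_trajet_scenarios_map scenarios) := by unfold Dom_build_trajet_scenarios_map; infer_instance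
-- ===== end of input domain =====

-- B registers the keys in first-occurrence order (same as A), then fills the groups from ONE
-- globally sorted pass instead of sorting each group; return values are identical.

-- shared key expression, identical in both Pythons:
-- scenario_id.split("__", 1)[0] if "__" in scenario_id else scenario_id
-- ([0] on the split result: split always returns a nonempty list, so headD's default is never used)
def tkey (sid : String) : String :=
  if PySem.Str.isIn "__" sid then ((PySem.Str.splitMax? sid "__" 1).getD []).headD "" else sid

-- ===== PORT A =====
def build_trajet_scenarios_map (scenarios : List String) : List (String × List String) :=
  -- out.setdefault(trajet_key, []).append(scenario_id)  ==  modify with default []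
  let out : PySem.Dict String (List String) :=
    scenarios.foldl (fun d sid => d.modify (tkey sid) [] (fun v => v ++ [sid])) PySem.Dict.empty
  -- for k in out: out[k] = sorted(out[k])
  let out2 := out.keys.foldl (fun d k => d.insert k (PySem.List.sorted (d.getD k []) id)) out
  out2.items

-- ===== PORT B =====
def build_trajet_scenarios_map_alt (scenarios : List String) : List (String × List String) :=
  -- first pass: out.setdefault(trajet_key, [])
  let d0 : PySem.Dict String (List String) :=
    scenarios.foldl (fun d sid => d.setdefault (tkey sid) []) PySem.Dict.empty
  -- second pass over sorted(scenarios): out[trajet_key].append(scenario_id)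
  -- (the key is always present — registered in the first pass — so modify's default [] is never used)
  let d1 := (PySem.List.sorted scenarios id).foldl
    (fun d sid => d.modify (tkey sid) [] (fun v => v ++ [sid])) d0
  d1.items

-- ===== PRECONDITION & SPEC =====
def Spec_build_trajet_scenarios_map (scenarios : List String) (out : List (String × List String)) : Prop := out = build_trajet_scenarios_map_alt scenarios
instance (scenarios : List String) (out : List (String × List String)) : Decidable (Spec_build_trajet_scenarios_map scenarios out) := by unfold Spec_build_trajet_scenarios_map; infer_instance

-- ===== CLAIM (what is proved, stated in full; the proofs are below) =====
def Claim_equal_build_trajet_scenarios_map : Prop := ∀ (scenarios : List String), Dom_build_trajet_scenarios_map scenarios → Spec_build_trajet_scenarios_map scenarios (build_trajet_scenarios_map scenarios)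

-- ===== LEMMAS AND PROOFS =====

-- projecting A's (key, element) pairs back: map-snd of a filter on the first component
theorem mapFilterSnd (xs : List String) (c : String) :
    List.map (fun x => x.2) (List.filter (fun p => p.1 == c) (xs.map (fun s => (tkey s, s))))
      = xs.filter (fun s => tkey s == c) := by
  induction xs with
  | nil => rfl
  | cons a as ih => by_cases h : tkey a == c <;> simp [List.filter, h, ih]

-- the grouping fold's value at key c is the filter of the traversed list
theorem groupFold_getD (xs : List String) (d : PySem.Dict String (List String)) (c : String) :
    (xs.foldl (fun d sid => d.modify (tkey sid) [] (fun v => v ++ [sid])) d).getD c []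
      = d.getD c [] ++ xs.filter (fun s => tkey s == c) := by
  have h := PySem.Dict.getD_foldl_modify_append (xs.map (fun s => (tkey s, s))) d c
  rw [List.foldl_map] at h
  simp only [h]
  congr 1
  exact mapFilterSnd xs c

theorem groupFold_keys (xs : List String) (d : PySem.Dict String (List String)) :
    (xs.foldl (fun d sid => d.modify (tkey sid) [] (fun v => v ++ [sid])) d).keys
      = PySem.Set.update d.keys (xs.map tkey) :=
  PySem.Dict.keys_foldl_modify_key xs tkey [] (fun _ sid => fun v => v ++ [sid]) d

-- a Set.update by already-present elements is a no-op
theorem set_update_of_subset (l : List String) (s : PySem.Set String)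
    (h : ∀ x ∈ l, x ∈ s) : PySem.Set.update s l = s := by
  induction l generalizing s with
  | nil => rfl
  | cons a as ih =>
      rw [PySem.Set.update_cons, PySem.Set.add_of_mem (h a (by simp))]
      exact ih s (fun x hx => h x (by simp [hx]))

-- B's first pass: every stored value is []
theorem setdefaultFold_getD (xs : List String) (d : PySem.Dict String (List String))
    (h : ∀ k, d.getD k [] = []) (k : String) :
    (xs.foldl (fun d sid => d.setdefault (tkey sid) []) d).getD k [] = [] := by
  induction xs generalizing d with
  | nil => exact h k
  | cons a as ih =>
      refine ih _ (fun k' => ?_)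
      by_cases hk : k' = tkey a
      · subst hk
        rw [PySem.Dict.getD_setdefault_self]; exact h _
      · rw [PySem.Dict.getD_eq_get?_getD, PySem.Dict.get?_setdefault_of_ne _ _ hk,
          ← PySem.Dict.getD_eq_get?_getD]
        exact h k'

-- B's first pass: keys in first-occurrence order of tkey
theorem setdefaultFold_keys (xs : List String) (d : PySem.Dict String (List String)) :
    (xs.foldl (fun d sid => d.setdefault (tkey sid) []) d).keys
      = PySem.Set.update d.keys (xs.map tkey) := by
  induction xs generalizing d with
  | nil => rfl
  | cons a as ih =>
      rw [List.foldl_cons, ih, List.map_cons, PySem.Set.update_cons]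
      congr 1
      rw [PySem.Dict.keys_setdefault, PySem.Set.add_eq_ite,
        PySem.Dict.contains_eq_decide_mem_keys]
      simp

-- A's second loop: each present key's value gets sorted exactly once
theorem sortPass_getD (K : List String) (hK : K.Nodup) (d : PySem.Dict String (List String))
    (k : String) :
    (K.foldl (fun d k => d.insert k (PySem.List.sorted (d.getD k []) id)) d).getD k []
      = if k ∈ K then PySem.List.sorted (d.getD k []) id else d.getD k [] := by
  induction K generalizing d with
  | nil => simp
  | cons a as ih =>
      rw [List.foldl_cons, ih (by exact hK.of_cons)]
      have ha : a ∉ as := (List.nodup_cons.mp hK).1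
      by_cases hk : k = a
      · subst hk
        simp [ha]
      · by_cases hmem : k ∈ as <;>
          simp [hmem, hk, PySem.Dict.getD_insert, List.mem_cons]

-- sorting commutes with filtering (strings, default key)
theorem sorted_filter_comm (xs : List String) (p : String → Bool) :
    PySem.List.sorted (xs.filter p) id = (PySem.List.sorted xs id).filter p := by
  have hperm : (PySem.List.sorted (xs.filter p) id).Perm ((PySem.List.sorted xs id).filter p) :=
    (PySem.List.sorted_perm (xs.filter p) id false).trans
      ((PySem.List.sorted_perm xs id false).filter p).symm
  have h1 : List.Pairwise (· ≤ ·) (PySem.List.sorted (xs.filter p) id) :=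
    PySem.List.sorted_pairwise (xs.filter p) id
  have h2 : List.Pairwise (· ≤ ·) ((PySem.List.sorted xs id).filter p) :=
    List.Pairwise.filter p (PySem.List.sorted_pairwise xs id)
  exact List.Perm.eq_of_pairwise
    (fun a b _ _ hab hba => le_antisymm hab hba) h1 h2 hperm

-- ===== VERDICT (by name: the statement is the Claim_ definition above) =====
theorem build_trajet_scenarios_map_spec : Claim_equal_build_trajet_scenarios_map := by
  intro scenarios _
  unfold Spec_build_trajet_scenarios_map build_trajet_scenarios_map build_trajet_scenarios_map_alt
  -- common key list
  set K : List String := PySem.Set.update ([] : PySem.Set String) (scenarios.map tkey) with hKdef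
  have hKnodup : K.Nodup := PySem.Set.nodup_update _ _ (by simp)
  -- A side
  set outA : PySem.Dict String (List String) :=
    scenarios.foldl (fun d sid => d.modify (tkey sid) [] (fun v => v ++ [sid])) PySem.Dict.empty with houtA
  have hAkeys : outA.keys = K := by
    rw [houtA, groupFold_keys]
    rfl
  have hAget : ∀ c, outA.getD c [] = scenarios.filter (fun s => tkey s == c) := by
    intro c; rw [houtA, groupFold_getD, PySem.Dict.getD_empty, List.nil_append]
  set out2 := outA.keys.foldl (fun d k => d.insert k (PySem.List.sorted (d.getD k []) id)) outA
    with hout2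
  have h2keys : out2.keys = K := by
    rw [hout2, PySem.Dict.keys_foldl_insert, set_update_of_subset _ _ (fun x hx => hx), hAkeys]
  have h2nodup : out2.keys.Nodup := by rw [h2keys]; exact hKnodup
  have h2get : ∀ k ∈ K, out2.getD k []
      = PySem.List.sorted (scenarios.filter (fun s => tkey s == k)) id := by
    intro k hk
    rw [hout2, sortPass_getD outA.keys (hAkeys ▸ hKnodup) outA k, hAkeys]
    simp [hk, hAget]
  -- B side
  set d0 : PySem.Dict String (List String) :=
    scenarios.foldl (fun d sid => d.setdefault (tkey sid) []) PySem.Dict.empty with hd0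
  have hBkeys0 : d0.keys = K := by
    rw [hd0, setdefaultFold_keys]
    rfl
  have hBget0 : ∀ k, d0.getD k [] = [] := by
    intro k; rw [hd0]
    exact setdefaultFold_getD scenarios PySem.Dict.empty (fun k' => PySem.Dict.getD_empty k' []) k
  set d1 := (PySem.List.sorted scenarios id).foldl
    (fun d sid => d.modify (tkey sid) [] (fun v => v ++ [sid])) d0 with hd1
  have hBkeys : d1.keys = K := by
    rw [hd1, groupFold_keys, hBkeys0]
    refine set_update_of_subset _ _ ?_
    intro x hx
    rcases List.mem_map.mp hx with ⟨s, hs, rfl⟩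
    have hsmem : s ∈ scenarios := ((PySem.List.sorted_perm scenarios id false).mem_iff).mp hs
    rw [hKdef]
    exact (PySem.Set.mem_update _ _ _).mpr (Or.inr (List.mem_map_of_mem hsmem))
  have hBnodup : d1.keys.Nodup := by rw [hBkeys]; exact hKnodup
  have hBget : ∀ k, d1.getD k []
      = (PySem.List.sorted scenarios id).filter (fun s => tkey s == k) := by
    intro k; rw [hd1, groupFold_getD, hBget0, List.nil_append]
  -- combine
  rw [PySem.Dict.items_eq_map_keys out2 h2nodup [], PySem.Dict.items_eq_map_keys d1 hBnodup [],
    h2keys, hBkeys]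
  refine List.map_congr_left (fun k hk => ?_)
  rw [h2get k hk, hBget k, sorted_filter_comm]
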